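-- pv_equiv track=rewrite | github.com/jeonhaelee/2022_programmers_python | prac83.py | head_sort
-- ===== SOURCE A (Python) =====
-- def head_sort(answer):
--
--     input_origin = []
--     head_li = []
--     for head, number, tail in answer:
--         input_origin.append(tail)
--         if head.lower() not in head_li:
--             head_li.append(head.lower())
--
--     head_li.sort()
--
--     result = []
--     for target in head_li:
--         for head, number, tail in answer:
--             if head.lower() == target:
--                 result.append([head, number, tail])
--
--     return result, input_origin
-- ===== SOURCE B (Python) =====
-- def head_sort(answer):
--     input_origin = []
--     buckets = {}
--     for head, number, tail in answer:
--         input_origin.append(tail)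
--         buckets.setdefault(head.lower(), []).append([head, number, tail])
--     result = []
--     for key in sorted(buckets):
--         result.extend(buckets[key])
--     return result, input_origin
-- ===== Notes on version B (the rewrite author's own statement) =====
-- stated objective: faster
-- what changed: B groups the triples into a dict keyed by head.lower() in one pass and emits the buckets over the sorted keys, instead of re-scanning the whole answer list once per distinct head (and doing a linear 'not in' membership scan per element).
import Mathlib
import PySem

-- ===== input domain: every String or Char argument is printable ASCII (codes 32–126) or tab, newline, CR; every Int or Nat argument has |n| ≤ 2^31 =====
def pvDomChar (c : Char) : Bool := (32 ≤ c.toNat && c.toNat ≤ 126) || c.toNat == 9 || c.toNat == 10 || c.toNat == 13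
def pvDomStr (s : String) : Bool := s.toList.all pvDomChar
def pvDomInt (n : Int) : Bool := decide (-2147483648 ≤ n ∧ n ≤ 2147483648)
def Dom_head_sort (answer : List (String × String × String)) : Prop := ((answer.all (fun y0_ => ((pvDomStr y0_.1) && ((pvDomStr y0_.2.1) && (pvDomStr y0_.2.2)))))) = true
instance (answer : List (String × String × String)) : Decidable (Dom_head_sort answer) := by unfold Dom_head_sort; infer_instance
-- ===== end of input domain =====

-- B groups the triples into a dict keyed by head.lower() in one pass and emits buckets
-- over the sorted keys, instead of re-scanning answer once per distinct head (objective: faster).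


-- ===== PORT A =====
def head_sort (answer : List (String × String × String)) : List (List String) × List String :=
  -- first loop: build input_origin and head_li (first-occurrence dedup of lowered heads)
  let s := answer.foldl
    (fun (acc : List String × List String) x =>
      let io := acc.1 ++ [x.2.2]
      let hl := if PySem.Str.lower x.1 ∈ acc.2 then acc.2 else acc.2 ++ [PySem.Str.lower x.1]
      (io, hl)) ([], [])
  -- head_li.sort()
  let head_li := PySem.List.sorted s.2 (fun t => t) false
  -- nested loops: for target in head_li: for (head, number, tail) in answer: …
  let result := head_li.foldl
    (fun res target =>
      answer.foldl
        (fun res x => if PySem.Str.lower x.1 == target then res ++ [[x.1, x.2.1, x.2.2]] else res)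
        res) []
  (result, s.1)

-- ===== PORT B =====
def head_sort_alt (answer : List (String × String × String)) : List (List String) × List String :=
  -- one pass: input_origin plus buckets.setdefault(head.lower(), []).append([head, number, tail])
  let s := answer.foldl
    (fun (acc : List String × PySem.Dict String (List (List String))) x =>
      (acc.1 ++ [x.2.2],
       acc.2.modify (PySem.Str.lower x.1) [] (fun l => l ++ [[x.1, x.2.1, x.2.2]])))
    ([], PySem.Dict.empty)
  -- for key in sorted(buckets): result.extend(buckets[key])
  let result := (PySem.List.sorted s.2.keys (fun t => t) false).foldl
    (fun res k => res ++ s.2.getD k []) []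
  (result, s.1)

-- ===== PRECONDITION & SPEC =====
def Spec_head_sort (answer : List (String × String × String)) (out : List (List String) × List String) : Prop := out = head_sort_alt answer
instance (answer : List (String × String × String)) (out : List (List String) × List String) : Decidable (Spec_head_sort answer out) := by unfold Spec_head_sort; infer_instance

-- ===== CLAIM (what is proved, stated in full; the proofs are below) =====
def Claim_equal_head_sort : Prop := ∀ (answer : List (String × String × String)), Dom_head_sort answer → Spec_head_sort answer (head_sort answer)

-- ===== LEMMAS AND PROOFS =====

-- the lowered head of a triple
def pvLower (x : String × String × String) : String := PySem.Str.lower x.1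
-- the emitted row
def pvRow (x : String × String × String) : List String := [x.1, x.2.1, x.2.2]
-- all rows of answer whose lowered head is t, in answer order
def pvGroup (answer : List (String × String × String)) (t : String) : List (List String) :=
  (answer.filter (fun x => pvLower x == t)).map pvRow
-- first-occurrence dedup fold shared by both first loops
def pvDedup (hl : List String) (answer : List (String × String × String)) : List String :=
  answer.foldl (fun hl x => if pvLower x ∈ hl then hl else hl ++ [pvLower x]) hl
-- the dict-building fold of B
def pvDict (d : PySem.Dict String (List (List String))) (answer : List (String × String × String)) :
    PySem.Dict String (List (List String)) :=
  answer.foldl (fun d x => d.modify (pvLower x) [] (fun l => l ++ [pvRow x])) d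

theorem pvA_first (answer : List (String × String × String)) (io hl : List String) :
    answer.foldl (fun (acc : List String × List String) x =>
        (acc.1 ++ [x.2.2],
         if PySem.Str.lower x.1 ∈ acc.2 then acc.2 else acc.2 ++ [PySem.Str.lower x.1]))
      (io, hl)
      = (io ++ answer.map (fun x => x.2.2), pvDedup hl answer) := by
  induction answer generalizing io hl with
  | nil => simp [pvDedup]
  | cons x rest ih => simp [pvDedup, List.foldl_cons, ih, pvLower]

theorem pvB_first (answer : List (String × String × String)) (io : List String)
    (d : PySem.Dict String (List (List String))) :
    answer.foldl (fun (acc : List String × PySem.Dict String (List (List String))) x =>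
        (acc.1 ++ [x.2.2],
         acc.2.modify (PySem.Str.lower x.1) [] (fun l => l ++ [[x.1, x.2.1, x.2.2]])))
      (io, d)
      = (io ++ answer.map (fun x => x.2.2), pvDict d answer) := by
  induction answer generalizing io d with
  | nil => simp [pvDict]
  | cons x rest ih => simp [pvDict, List.foldl_cons, ih, pvLower, pvRow]

theorem pvDict_keys (answer : List (String × String × String))
    (d : PySem.Dict String (List (List String))) :
    (pvDict d answer).keys = pvDedup d.keys answer := by
  induction answer generalizing d with
  | nil => simp [pvDict, pvDedup]
  | cons x rest ih =>
    simp only [pvDict, pvDedup, List.foldl_cons] at *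
    rw [ih]
    congr 1
    rw [PySem.Dict.keys_modify]
    by_cases h : pvLower x ∈ d.keys
    · rw [PySem.Dict.keys_insert_of_contains _ _ (by simp [PySem.Dict.contains_eq_decide_mem_keys, h])]
      simp [h]
    · rw [PySem.Dict.keys_insert_of_not_contains _ _ (by simp [PySem.Dict.contains_eq_decide_mem_keys, h])]
      simp [h]

theorem pvDict_getD (answer : List (String × String × String))
    (d : PySem.Dict String (List (List String))) (t : String) :
    (pvDict d answer).getD t [] = d.getD t [] ++ pvGroup answer t := by
  induction answer generalizing d with
  | nil => simp [pvDict, pvGroup]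
  | cons x rest ih =>
    simp only [pvDict, pvGroup, List.foldl_cons, List.filter_cons] at *
    rw [ih]
    by_cases h : pvLower x = t
    · simp [PySem.Dict.getD_modify, h]
    · simp [PySem.Dict.getD_modify, h, Ne.symm h]

theorem pvA_inner (answer : List (String × String × String)) (t : String)
    (res : List (List String)) :
    answer.foldl
        (fun res x => if PySem.Str.lower x.1 == t then res ++ [[x.1, x.2.1, x.2.2]] else res)
        res
      = res ++ pvGroup answer t := by
  induction answer generalizing res with
  | nil => simp [pvGroup]
  | cons x rest ih =>
    simp only [pvGroup, pvLower, List.foldl_cons, List.filter_cons, beq_iff_eq] at *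
    by_cases h : PySem.Str.lower x.1 = t
    · simp [h, ih, pvRow]
    · simp [h, ih]

theorem pvFold_groups (keys : List String) (answer : List (String × String × String))
    (res : List (List String)) :
    keys.foldl
        (fun res target =>
          answer.foldl
            (fun res x => if PySem.Str.lower x.1 == target then res ++ [[x.1, x.2.1, x.2.2]] else res)
            res) res
      = keys.foldl (fun res k => res ++ pvGroup answer k) res := by
  induction keys generalizing res with
  | nil => rfl
  | cons k rest ih => simp only [List.foldl_cons, pvA_inner, ih]

-- ===== VERDICT (by name: the statement is the Claim_ definition above) =====
theorem head_sort_spec : Claim_equal_head_sort := by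
  intro answer _
  unfold Spec_head_sort head_sort head_sort_alt
  simp only [pvA_first, pvB_first, pvFold_groups, pvDict_keys, pvDict_getD,
    PySem.Dict.keys_empty, PySem.Dict.getD_empty, List.nil_append]
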